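-- pv_equiv track=rewrite | github.com/Koutarouu/HackerRank-Algorithms | ExtraLongFactorial.py | get_factorial2
-- ===== SOURCE A (Python) =====
-- def get_factorial2(n):
--   old = [1]
--   current = []
--   for i in range(2, n+1):
--     carry = 0
--     for digit in old:
--       prod = int(digit) * i + carry
--       rem = prod % 10
--       current.append(rem)
--       carry = prod // 10
--     if carry != 0:
--       for j in str(carry)[::-1]:
--         current.append(j)  # add j as a str
--     old = current
--     current = []
--
--   return "".join(map(str,old[::-1])) # convert everything to str before concatenation and returning the results
-- ===== SOURCE B (Python) =====
-- def get_factorial2(n):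
--   result = 1
--   for i in range(2, n + 1):
--     result *= i
--   digits = []
--   while result > 0:
--     result, r = divmod(result, 10)
--     digits.append(chr(48 + r))
--   return ''.join(reversed(digits))
-- ===== Notes on version B (the rewrite author's own statement) =====
-- stated objective: faster
-- what changed: Replaces A's little-endian decimal-digit list with its per-multiplication inner carry pass by a single big-integer accumulator multiplied in one pass, with the decimal digits extracted once at the end.
import Mathlib
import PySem

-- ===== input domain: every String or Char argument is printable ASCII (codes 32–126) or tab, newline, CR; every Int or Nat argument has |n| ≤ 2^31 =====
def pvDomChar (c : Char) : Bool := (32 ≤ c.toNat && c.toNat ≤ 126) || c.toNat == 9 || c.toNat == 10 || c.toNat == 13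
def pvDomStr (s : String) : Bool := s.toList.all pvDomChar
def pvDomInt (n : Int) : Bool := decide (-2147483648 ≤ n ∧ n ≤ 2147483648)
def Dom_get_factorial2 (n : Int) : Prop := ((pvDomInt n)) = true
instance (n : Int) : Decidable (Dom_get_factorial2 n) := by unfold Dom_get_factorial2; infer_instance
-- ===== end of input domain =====

-- B replaces A's digit-list with one big-integer accumulator multiplied in a single
-- pass, extracting the decimal digits once at the end (measured faster by the check).

-- ===== PORT A =====
-- inner loop of A: one multiply-and-carry pass over the digit list (little-endian)
def pvInner (i : Int) (old : List Int) : List Int × Int :=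
  old.foldl
    (fun (st : List Int × Int) digit =>
      let prod := digit * i + st.2
      (st.1 ++ [PySem.Int.mod prod 10], PySem.Int.floordiv prod 10))
    ([], 0)

-- body of A's outer 'for i in range(2, n+1)' loop.  'for j in str(carry)[::-1]:
-- current.append(j)' appends decimal digit CHARACTERS; each is stored here as its
-- digit value, which is exact: Python only ever applies int(...) (next iteration)
-- and str(...) (final join) to the stored element, and both give the same result
-- for the digit 5 and the character '5'.
def pvAStep (old : List Int) (i : Int) : List Int :=
  if (pvInner i old).2 ≠ 0 then
    (pvInner i old).1
      ++ ((PySem.Int.toChars (pvInner i old).2).reverse.map fun c => ((c.toNat : Int) - 48))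
  else (pvInner i old).1

def get_factorial2 (n : Int) : String :=
  let old := (PySem.List.pyRange 2 (n + 1) 1).foldl pvAStep [1]
  PySem.Str.join "" (old.reverse.map PySem.Int.toStr)

-- ===== PORT B =====
-- 'while result > 0: result, r = divmod(result, 10); digits.append(chr(48 + r))';
-- each appended 1-character string is represented as its Char
def pvToDecChars (v : Int) (acc : List Char) : List Char :=
  if 0 < v then
    pvToDecChars (PySem.Int.floordiv v 10)
      (acc ++ [Char.ofNat ((48 : Int) + PySem.Int.mod v 10).toNat])
  else acc
termination_by v.toNat
decreasing_by
  rw [PySem.Int.floordiv_eq_ediv_of_pos (by norm_num : (0:Int) < 10)]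
  omega

def get_factorial2_alt (n : Int) : String :=
  let result := (PySem.List.pyRange 2 (n + 1) 1).foldl (fun result i => result * i) 1
  let digits := pvToDecChars result []
  -- ''.join(reversed(digits)): the string of the reversed character list
  String.ofList digits.reverse

-- ===== PRECONDITION & SPEC =====
def Spec_get_factorial2 (n : Int) (out : String) : Prop := out = get_factorial2_alt n
instance (n : Int) (out : String) : Decidable (Spec_get_factorial2 n out) := by unfold Spec_get_factorial2; infer_instance

-- ===== CLAIM (what is proved, stated in full; the proofs are below) =====
def Claim_equal_get_factorial2 : Prop := ∀ (n : Int), Dom_get_factorial2 n → Spec_get_factorial2 n (get_factorial2 n)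

-- ===== LEMMAS AND PROOFS =====

-- schoolbook multiply-and-carry pass, in Nat: digits (little-endian), multiplier, carry
def pvSchool (i : Nat) : List Nat → Nat → List Nat × Nat
  | [], c => ([], c)
  | d :: ds, c =>
      let p := d * i + c
      let r := pvSchool i ds (p / 10)
      (p % 10 :: r.1, r.2)

-- A's inner foldl is pvSchool, through the Nat → Int casts
lemma pvFold_eq (i : Nat) : ∀ (ds : List Nat) (c : Nat) (acc : List Int),
    (ds.map Int.ofNat).foldl
      (fun (st : List Int × Int) digit =>
        let prod := digit * (i : Int) + st.2
        (st.1 ++ [PySem.Int.mod prod 10], PySem.Int.floordiv prod 10))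
      (acc, (c : Int))
    = (acc ++ (pvSchool i ds c).1.map Int.ofNat, ((pvSchool i ds c).2 : Int)) := by
  intro ds
  induction ds with
  | nil => intro c acc; simp [pvSchool]
  | cons d ds ih =>
      intro c acc
      simp only [List.map_cons, List.foldl_cons]
      have hm : PySem.Int.mod ((d : Int) * (i : Int) + (c : Int)) 10
          = ((d * i + c) % 10 : Nat) := by
        rw [PySem.Int.mod_eq_emod_of_pos (by norm_num : (0:Int) < 10)]
        push_cast
        omega
      have hd : PySem.Int.floordiv ((d : Int) * (i : Int) + (c : Int)) 10
          = ((d * i + c) / 10 : Nat) := by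
        rw [PySem.Int.floordiv_eq_ediv_of_pos (by norm_num : (0:Int) < 10)]
        push_cast
        omega
      simp only [Int.ofNat_eq_natCast] at hm hd ⊢
      rw [hm, hd, ih ((d * i + c) / 10) (acc ++ [(((d * i + c) % 10 : Nat) : Int)])]
      simp [pvSchool, List.append_assoc]

-- the full output of one pass (digits produced ++ digits of the final carry)
-- is exactly the digit list of m * i + c
lemma pvSchool_digits (i : Nat) (hi : 2 ≤ i) : ∀ (m c : Nat),
    (pvSchool i (Nat.digits 10 m) c).1 ++ Nat.digits 10 (pvSchool i (Nat.digits 10 m) c).2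
    = Nat.digits 10 (m * i + c) := by
  intro m
  induction m using Nat.strong_induction_on with
  | _ m ih =>
    intro c
    rcases Nat.eq_zero_or_pos m with hm | hm
    · subst hm; simp [pvSchool]
    · rw [Nat.digits_def' (by norm_num : 1 < 10) hm]
      simp only [pvSchool]
      have hdiv : m / 10 < m := Nat.div_lt_self hm (by norm_num)
      rw [List.cons_append, ih (m / 10) hdiv ((m % 10 * i + c) / 10)]
      have hval : m * i + c = 10 * (m / 10 * i) + (m % 10 * i + c) := by
        calc m * i + c = (10 * (m / 10) + m % 10) * i + c := by
              rw [Nat.div_add_mod m 10]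
        _ = 10 * (m / 10 * i) + (m % 10 * i + c) := by ring
      have hpos2 : 0 < m * i + c := by
        have h2 : 1 * 2 ≤ m * i := Nat.mul_le_mul hm hi
        omega
      rw [Nat.digits_def' (by norm_num : 1 < 10) hpos2, hval, Nat.mul_add_mod,
        Nat.mul_add_div (by norm_num : 0 < 10)]

-- characterisation of core's Nat.toDigits in terms of Nat.digits
lemma pvToDigitsCore_eq : ∀ (fuel m : Nat) (acc : List Char), 0 < m → m < fuel →
    Nat.toDigitsCore 10 fuel m acc = ((Nat.digits 10 m).map Nat.digitChar).reverse ++ acc := by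
  intro fuel
  induction fuel with
  | zero => intro m acc hm hlt; omega
  | succ f ih =>
      intro m acc hm hlt
      rw [Nat.toDigitsCore]
      rw [Nat.digits_def' (by norm_num : 1 < 10) hm]
      by_cases h0 : m / 10 = 0
      · simp [h0, Nat.digits_zero]
      · have hq : 0 < m / 10 := Nat.pos_of_ne_zero h0
        have hlt' : m / 10 < f := by
          have := Nat.div_lt_self hm (by norm_num : 1 < 10)
          omega
        simp only [if_neg h0]
        rw [ih (m / 10) ((m % 10).digitChar :: acc) hq hlt']
        simp [List.append_assoc]

lemma pvToDigits_eq (m : Nat) (hm : 0 < m) :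
    Nat.toDigits 10 m = ((Nat.digits 10 m).map Nat.digitChar).reverse := by
  rw [Nat.toDigits, pvToDigitsCore_eq (m + 1) m [] hm (by omega), List.append_nil]

-- the characters A appends for the carry are exactly the carry's digits, as values
lemma pvCarryChars (c : Nat) (hc : 0 < c) :
    (PySem.Int.toChars (c : Int)).reverse.map (fun ch => ((ch.toNat : Int) - 48))
    = (Nat.digits 10 c).map Int.ofNat := by
  have h1 : PySem.Int.toChars (c : Int) = Nat.toDigits 10 c := by
    simp [PySem.Int.toChars]
  rw [h1, pvToDigits_eq c hc, List.reverse_reverse, List.map_map]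
  apply List.map_congr_left
  intro d hd
  have hlt : d < 10 := Nat.digits_lt_base (by norm_num) hd
  interval_cases d <;> decide

-- one outer iteration maps the digit list of v to the digit list of v * i
lemma pvAStep_digits (v : Nat) (i : Nat) (hi : 2 ≤ i) :
    pvAStep ((Nat.digits 10 v).map Int.ofNat) (i : Int)
    = (Nat.digits 10 (v * i)).map Int.ofNat := by
  have hIn : pvInner (i : Int) ((Nat.digits 10 v).map Int.ofNat)
      = ((pvSchool i (Nat.digits 10 v) 0).1.map Int.ofNat,
         ((pvSchool i (Nat.digits 10 v) 0).2 : Int)) := by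
    unfold pvInner
    have h := pvFold_eq i (Nat.digits 10 v) 0 []
    simpa using h
  unfold pvAStep
  rw [hIn]
  have hfull := pvSchool_digits i hi v 0
  set S := pvSchool i (Nat.digits 10 v) 0 with hS
  by_cases hz : S.2 = 0
  · rw [hz] at hfull
    simp only [Nat.digits_zero, List.append_nil] at hfull
    simp [hz, hfull]
  · have hpos : 0 < S.2 := Nat.pos_of_ne_zero hz
    have hne : ((S.2 : Nat) : Int) ≠ 0 := by exact_mod_cast hz
    simp only [if_pos hne]
    rw [pvCarryChars S.2 hpos, ← List.map_append, hfull, Nat.add_zero]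

-- A's whole loop: folding pvAStep over any list of multipliers ≥ 2 keeps the
-- digit-list representation of the running product
lemma pvOuter (L : List Int) (hL : ∀ x ∈ L, 2 ≤ x) : ∀ (v : Nat),
    L.foldl pvAStep ((Nat.digits 10 v).map Int.ofNat)
    = (Nat.digits 10 (L.foldl (fun a x => a * x.toNat) v)).map Int.ofNat := by
  induction L with
  | nil => intro v; simp
  | cons x L ih =>
      intro v
      have hx : 2 ≤ x := hL x List.mem_cons_self
      have hcast : ((x.toNat : Nat) : Int) = x := Int.toNat_of_nonneg (by omega)
      simp only [List.foldl_cons]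
      rw [← hcast, pvAStep_digits v x.toNat (by omega), Int.toNat_natCast]
      exact ih (fun y hy => hL y (List.mem_cons_of_mem x hy)) (v * x.toNat)

-- B's product fold, through the cast
lemma pvProdCast (L : List Int) (hL : ∀ x ∈ L, 2 ≤ x) : ∀ (v : Nat),
    L.foldl (fun result i => result * i) (v : Int)
    = ((L.foldl (fun a x => a * x.toNat) v : Nat) : Int) := by
  induction L with
  | nil => intro v; simp
  | cons x L ih =>
      intro v
      have hx : 2 ≤ x := hL x List.mem_cons_self
      have hcast : ((x.toNat : Nat) : Int) = x := Int.toNat_of_nonneg (by omega)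
      simp only [List.foldl_cons]
      rw [← hcast, ← Nat.cast_mul, Int.toNat_natCast]
      exact ih (fun y hy => hL y (List.mem_cons_of_mem x hy)) (v * x.toNat)

-- B's digit-extraction loop produces the digit characters, little-endian
lemma pvToDec_eq (v : Nat) : ∀ (acc : List Char),
    pvToDecChars (v : Int) acc = acc ++ (Nat.digits 10 v).map Nat.digitChar := by
  induction v using Nat.strong_induction_on with
  | _ v ih =>
    intro acc
    rcases Nat.eq_zero_or_pos v with hv | hv
    · subst hv; rw [pvToDecChars]; simp
    · rw [pvToDecChars]
      have hpos : (0 : Int) < (v : Int) := by exact_mod_cast hv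
      have hm : PySem.Int.mod (v : Int) 10 = ((v % 10 : Nat) : Int) := by
        rw [PySem.Int.mod_eq_emod_of_pos (by norm_num : (0:Int) < 10)]
        omega
      have hd : PySem.Int.floordiv (v : Int) 10 = ((v / 10 : Nat) : Int) := by
        rw [PySem.Int.floordiv_eq_ediv_of_pos (by norm_num : (0:Int) < 10)]
        omega
      have hchar : Char.ofNat ((48 : Int) + ((v % 10 : Nat) : Int)).toNat
          = Nat.digitChar (v % 10) := by
        have hlt : v % 10 < 10 := Nat.mod_lt _ (by norm_num)
        set r := v % 10 with hr
        interval_cases r <;> decide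
      rw [if_pos hpos, hm, hd, hchar,
        ih (v / 10) (Nat.div_lt_self hv (by norm_num)) (acc ++ [Nat.digitChar (v % 10)]),
        Nat.digits_def' (by norm_num : 1 < 10) hv]
      simp [List.append_assoc]

-- each single digit prints as its digit character
lemma pvToCharsDigit (d : Nat) (hd : d < 10) :
    PySem.Int.toChars (d : Int) = [Nat.digitChar d] := by
  interval_cases d <;> decide

-- the two final string constructions agree on the digit list of v
lemma pvJoin (v : Nat) :
    PySem.Str.join "" (((Nat.digits 10 v).map Int.ofNat).reverse.map PySem.Int.toStr)
    = String.ofList (pvToDecChars (v : Int) []).reverse := by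
  rw [pvToDec_eq v [], List.nil_append]
  rw [PySem.Str.join]
  have hparts : (((Nat.digits 10 v).map Int.ofNat).reverse.map PySem.Int.toStr).map String.toList
      = (((Nat.digits 10 v).map Nat.digitChar).reverse).map (fun c => [c]) := by
    rw [← List.map_reverse, ← List.map_reverse, List.map_map, List.map_map, List.map_map]
    apply List.map_congr_left
    intro d hd
    have hlt : d < 10 := Nat.digits_lt_base (by norm_num) (List.mem_reverse.mp hd)
    simp only [Function.comp, Int.ofNat_eq_natCast]
    rw [PySem.Int.toStr, String.toList_ofList, pvToCharsDigit d hlt]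
  rw [hparts]
  have hsep : ("" : String).toList = [] := rfl
  rw [hsep, PySem.Chars.join_nil_singletons]

-- ===== VERDICT (by name: the statement is the Claim_ definition above) =====
theorem get_factorial2_spec : Claim_equal_get_factorial2 := by
  unfold Claim_equal_get_factorial2
  intro n _
  unfold Spec_get_factorial2 get_factorial2 get_factorial2_alt
  have hL : ∀ x ∈ PySem.List.pyRange 2 (n + 1) 1, 2 ≤ x := by
    intro x hx
    exact (PySem.List.mem_pyRange_one.mp hx).1
  have h1 : ([1] : List Int) = (Nat.digits 10 1).map Int.ofNat := by decide
  have hprod := pvProdCast _ hL 1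
  simp only [Nat.cast_one] at hprod
  simp only []
  rw [h1, pvOuter _ hL 1, hprod]
  exact pvJoin _
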